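-- pv_equiv track=rewrite | github.com/learningcoder00/CenterPoint | tools/generate_clip_preview.py | choose_split_index
-- ===== SOURCE A (Python) =====
-- def choose_split_index(clips, preferred_min_frames):
--     preferred = [
--         (idx, len(clip)) for idx, clip in enumerate(clips) if len(clip) >= preferred_min_frames
--     ]
--     if preferred:
--         return max(preferred, key=lambda x: x[1])[0]
--
--     fallback = [(idx, len(clip)) for idx, clip in enumerate(clips) if len(clip) >= 2]
--     if not fallback:
--         return None
--     return max(fallback, key=lambda x: x[1])[0]
-- ===== SOURCE B (Python) =====
-- def choose_split_index(clips, preferred_min_frames):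
--     # Key fact: a longest clip overall is also longest within either threshold
--     # subset, so the answer is always the first index of the globally longest
--     # clip -- provided its length meets at least one of the two thresholds.
--     lengths = [len(clip) for clip in clips]
--     if not lengths:
--         return None
--     m = max(lengths)
--     if m >= preferred_min_frames or m >= 2:
--         return lengths.index(m)
--     return None
-- ===== Notes on version B (the rewrite author's own statement) =====
-- stated objective: simpler
-- what changed: B uses the fact that the answer is always the first index of the globally longest clip when its length meets either threshold: one global max over the lengths plus one index lookup replace A's two threshold-filtered candidate lists each reduced with max().
import Mathlib
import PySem

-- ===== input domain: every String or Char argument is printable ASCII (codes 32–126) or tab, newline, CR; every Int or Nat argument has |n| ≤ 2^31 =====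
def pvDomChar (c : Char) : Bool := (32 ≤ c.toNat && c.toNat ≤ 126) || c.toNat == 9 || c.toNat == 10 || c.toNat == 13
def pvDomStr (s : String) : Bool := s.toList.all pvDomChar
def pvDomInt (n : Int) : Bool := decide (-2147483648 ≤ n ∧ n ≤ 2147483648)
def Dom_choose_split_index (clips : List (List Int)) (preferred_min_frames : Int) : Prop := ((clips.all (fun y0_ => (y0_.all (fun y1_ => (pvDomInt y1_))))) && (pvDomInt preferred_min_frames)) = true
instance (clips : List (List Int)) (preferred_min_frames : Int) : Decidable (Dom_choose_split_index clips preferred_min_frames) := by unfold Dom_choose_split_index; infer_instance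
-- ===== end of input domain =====

-- B drops A's two threshold-filtered candidate lists: the answer is always the first index of the
-- globally longest clip when its length meets either threshold (objective: simpler).

-- ===== PORT A =====
-- A builds `preferred`, returns max by length if nonempty; else builds `fallback`, returns max by
-- length if nonempty; else None. `if preferred:` / `if not fallback:` are the none/some cases of
-- max?, which is none exactly on the empty list.
def choose_split_index (clips : List (List Int)) (preferred_min_frames : Int) : Option Int :=
  let preferred := ((PySem.List.enumerate clips 0).filter
      (fun p => decide (preferred_min_frames ≤ ((p.2.length : Int))))).map
      (fun p => (p.1, ((p.2.length : Int))))
  match PySem.List.max? preferred (fun x => x.2) with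
  | some m => some m.1
  | none =>
    let fallback := ((PySem.List.enumerate clips 0).filter
        (fun p => decide ((2 : Int) ≤ ((p.2.length : Int))))).map
        (fun p => (p.1, ((p.2.length : Int))))
    match PySem.List.max? fallback (fun x => x.2) with
    | some m => some m.1
    | none => none

-- ===== PORT B =====
-- Source B: lengths = [len(clip) for clip in clips]; if empty return None; m = max(lengths);
-- return lengths.index(m) if m meets either threshold, else None.
-- max? is none exactly when lengths = [] (Python's early `if not lengths` guard);
-- the inner none branch of index? is unreachable since m ∈ lengths.
def choose_split_index_alt (clips : List (List Int)) (preferred_min_frames : Int) : Option Int :=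
  let lengths := clips.map (fun clip => ((clip.length : Int)))
  match PySem.List.max? lengths (fun x => x) with
  | none => none
  | some m =>
    if preferred_min_frames ≤ m ∨ (2 : Int) ≤ m then
      match PySem.List.index? lengths m with
      | some j => some ((j : Int))
      | none => none
    else none

-- ===== PRECONDITION & SPEC =====
def Spec_choose_split_index (clips : List (List Int)) (preferred_min_frames : Int) (out : Option Int) : Prop := out = choose_split_index_alt clips preferred_min_frames
instance (clips : List (List Int)) (preferred_min_frames : Int) (out : Option Int) : Decidable (Spec_choose_split_index clips preferred_min_frames out) := by unfold Spec_choose_split_index; infer_instance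

-- ===== CLAIM (what is proved, stated in full; the proofs are below) =====
def Claim_equal_choose_split_index : Prop := ∀ (clips : List (List Int)) (preferred_min_frames : Int), Dom_choose_split_index clips preferred_min_frames → Spec_choose_split_index clips preferred_min_frames (choose_split_index clips preferred_min_frames)

-- ===== LEMMAS AND PROOFS =====

-- structural recursion computing the FIRST element of maximal key (what Python's max(..., key) returns)
def pvFmx {α : Type} (key : α → Int) : List α → Option α
  | [] => none
  | x :: t =>
    match pvFmx key t with
    | none => some x
    | some y => if key x < key y then some y else some x

theorem pvFoldFmx {α : Type} (key : α → Int) :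
    ∀ (l : List α) (b : α),
      l.foldl (fun acc x => match acc with
        | none => some x
        | some m => if key m < key x then some x else some m) (some b)
      = match pvFmx key l with
        | none => some b
        | some y => if key b < key y then some y else some b := by
  intro l
  induction l with
  | nil => intro b; rfl
  | cons x t ih =>
    intro b
    rw [List.foldl_cons]
    dsimp only
    by_cases hbx : key b < key x
    · rw [if_pos hbx, ih x]
      simp only [pvFmx]
      cases h : pvFmx key t with
      | none => dsimp only; rw [if_pos hbx]
      | some y =>
        dsimp only
        by_cases hxy : key x < key y
        · rw [if_pos hxy]
          dsimp only
          rw [if_pos (show key b < key y by omega)]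
        · rw [if_neg hxy]
          dsimp only
          rw [if_pos hbx]
    · rw [if_neg hbx, ih b]
      simp only [pvFmx]
      cases h : pvFmx key t with
      | none => dsimp only; rw [if_neg hbx]
      | some y =>
        dsimp only
        by_cases hxy : key x < key y
        · rw [if_pos hxy]
        · rw [if_neg hxy]
          dsimp only
          rw [if_neg hbx, if_neg (show ¬ key b < key y by omega)]

theorem pvMaxBridge {α : Type} (key : α → Int) (l : List α) :
    PySem.List.max? l key = pvFmx key l := by
  have hfold : PySem.List.max? l key =
      l.foldl (fun acc x => match acc with
        | none => some x
        | some m => if key m < key x then some x else some m) none := by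
    unfold PySem.List.max?
    congr 1
  rw [hfold]
  cases l with
  | nil => rfl
  | cons x t =>
    rw [List.foldl_cons]
    show List.foldl _ (some x) t = _
    rw [pvFoldFmx]
    simp only [pvFmx]

-- filtering by a threshold on the key either keeps the first maximum or empties the list
theorem pvFmxFilter (t : Int) :
    ∀ (es : List (Int × Int)),
      pvFmx (fun p => p.2) (es.filter (fun p => decide (t ≤ p.2)))
      = match pvFmx (fun p => p.2) es with
        | none => none
        | some y => if t ≤ y.2 then some y else none := by
  intro es
  induction es with
  | nil => rfl
  | cons x es ih =>
    by_cases hx : t ≤ x.2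
    · rw [List.filter_cons_of_pos (by simpa using hx)]
      simp only [pvFmx, ih]
      cases h : pvFmx (fun p => p.2) es with
      | none => dsimp only; rw [if_pos hx]
      | some y =>
        dsimp only
        by_cases hty : t ≤ y.2
        · rw [if_pos hty]
          dsimp only
          by_cases hxy : x.2 < y.2
          · rw [if_pos hxy]
            dsimp only
            rw [if_pos hty]
          · rw [if_neg hxy]
            dsimp only
            rw [if_pos hx]
        · rw [if_neg hty]
          dsimp only
          rw [if_neg (show ¬ x.2 < y.2 by omega)]
          dsimp only
          rw [if_pos hx]
    · rw [List.filter_cons_of_neg (by simpa using hx)]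
      rw [ih]
      simp only [pvFmx]
      cases h : pvFmx (fun p => p.2) es with
      | none => dsimp only; rw [if_neg hx]
      | some y =>
        dsimp only
        by_cases hxy : x.2 < y.2
        · rw [if_pos hxy]
        · rw [if_neg hxy]
          dsimp only
          rw [if_neg hx, if_neg (show ¬ t ≤ y.2 by omega)]

-- the first length-maximum over the enumerated clips is (start + first index of max, max of lengths)
theorem pvFmxEnum :
    ∀ (clips : List (List Int)) (k : Int),
      pvFmx (fun p => p.2) ((PySem.List.enumerate clips k).map (fun p => (p.1, ((p.2.length : Int)))))
      = match pvFmx (fun x => x) (clips.map (fun c => ((c.length : Int)))) with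
        | none => none
        | some m =>
          match PySem.List.index? (clips.map (fun c => ((c.length : Int)))) m with
          | some j => some (k + (j : Int), m)
          | none => none := by
  intro clips
  induction clips with
  | nil => intro k; simp [PySem.List.enumerate_nil, pvFmx]
  | cons c rest ih =>
    intro k
    rw [PySem.List.enumerate_cons, List.map_cons, List.map_cons]
    simp only [pvFmx, ih (k + 1)]
    cases h : pvFmx (fun x => x) (rest.map (fun c => ((c.length : Int)))) with
    | none =>
      dsimp only
      rw [PySem.List.index?_cons_self]
      simp
    | some m =>
      have hmem : m ∈ rest.map (fun c => ((c.length : Int))) := by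
        have hb := pvMaxBridge (fun x => x) (rest.map (fun c => ((c.length : Int))))
        exact PySem.List.max?_mem (by rw [hb, h])
      obtain ⟨j, hj⟩ := Option.isSome_iff_exists.mp
        ((PySem.List.index?_isSome_iff _ _).mpr hmem)
      dsimp only
      rw [hj]
      dsimp only
      by_cases hlt : ((c.length : Int)) < m
      · have hne : ((c.length : Int)) ≠ m := by omega
        rw [if_pos hlt, if_pos hlt]
        dsimp only
        rw [PySem.List.index?_cons_of_ne _ hne, hj]
        simp only [Option.map_some]
        have harith : k + 1 + (j : Int) = k + ((j + 1 : Nat) : Int) := by push_cast; ring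
        rw [harith]
      · rw [if_neg hlt, if_neg hlt]
        dsimp only
        rw [PySem.List.index?_cons_self]
        simp

-- filter of a composed predicate commutes with map
theorem pvFilterMap (t : Int) (l : List (Int × List Int)) :
    (l.filter (fun p => decide (t ≤ ((p.2.length : Int))))).map (fun p => (p.1, ((p.2.length : Int))))
    = (l.map (fun p => (p.1, ((p.2.length : Int))))).filter (fun q => decide (t ≤ q.2)) := by
  induction l with
  | nil => rfl
  | cons x l ih =>
    by_cases hx : t ≤ ((x.2.length : Int))
    · rw [List.filter_cons_of_pos (by simpa using hx), List.map_cons, List.map_cons,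
        List.filter_cons_of_pos (by simpa using hx), ih]
    · rw [List.filter_cons_of_neg (by simpa using hx), List.map_cons,
        List.filter_cons_of_neg (by simpa using hx), ih]

theorem pvAltEq (clips : List (List Int)) (pmf : Int) :
    choose_split_index clips pmf = choose_split_index_alt clips pmf := by
  unfold choose_split_index choose_split_index_alt
  simp only [pvFilterMap, pvMaxBridge, pvFmxFilter, pvFmxEnum]
  cases h : pvFmx (fun x => x) (clips.map (fun c => ((c.length : Int)))) with
  | none => simp
  | some m =>
    have hmem : m ∈ clips.map (fun c => ((c.length : Int))) := by
      have hb := pvMaxBridge (fun x => x) (clips.map (fun c => ((c.length : Int))))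
      exact PySem.List.max?_mem (by rw [hb, h])
    obtain ⟨j, hj⟩ := Option.isSome_iff_exists.mp
      ((PySem.List.index?_isSome_iff _ _).mpr hmem)
    dsimp only
    rw [hj]
    dsimp only
    by_cases hp : pmf ≤ m
    · simp [hp]
    · by_cases h2 : (2 : Int) ≤ m
      · simp [hp, h2]
      · simp [hp, h2]

-- ===== VERDICT (by name: the statement is the Claim_ definition above) =====
theorem choose_split_index_spec : Claim_equal_choose_split_index := by
  intro clips pmf _
  unfold Spec_choose_split_index
  exact pvAltEq clips pmf
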